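-- pv_equiv track=rewrite | github.com/asayda01/leetcode | MishiPay_Toy_Shop.py | getMaxToys
-- ===== SOURCE A (Python) =====
-- def getMaxToys(N, P, k, x, toys):
--     # Combine x and toys into a list of tuples and sort based on x
--     shops = sorted(zip(x, toys), key=lambda shop: shop[0])
--
--     # Separate the sorted x and toys
--     sorted_x = [shop[0] for shop in shops]
--     sorted_toys = [shop[1] for shop in shops]
--
--     # Find the index where P would be inserted to keep the list sorted
--     # This helps in dividing the shops into left and right of P
--     left_shops = []
--     right_shops = []
--     for shop in shops:
--         if shop[0] < P:
--             left_shops.append(shop)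
--         else:
--             right_shops.append(shop)
--
--     # Prepare prefix sums for left and right shops
--     # Left shops are in reverse order (closest to P first)
--     left_prefix = []
--     total = 0
--     for shop in reversed(left_shops):
--         total += shop[1]
--         left_prefix.append(total)
--
--     right_prefix = []
--     total = 0
--     for shop in right_shops:
--         total += shop[1]
--         right_prefix.append(total)
--
--     max_toys = 0
--
--     # Try all possible combinations of left and right shops
--     # i is the number of left shops visited, j is the number of right shops visited
--     for i in range(len(left_prefix) + 1):
--         for j in range(len(right_prefix) + 1):
--             if i == 0 and j == 0:
--                 continue  # No shops visited
--             # Calculate steps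
--             steps = 0
--             if i > 0:
--                 steps += abs(P - left_shops[-i][0])
--             if j > 0:
--                 steps += abs(P - right_shops[j-1][0])
--             if i > 0 and j > 0:
--                 steps += abs(left_shops[-i][0] - right_shops[j-1][0])
--             if steps <= k:
--                 total_toys = (left_prefix[i-1] if i > 0 else 0) + (right_prefix[j-1] if j > 0 else 0)
--                 if total_toys > max_toys:
--                     max_toys = total_toys
--     return max_toys
-- ===== SOURCE B (Python) =====
-- def getMaxToys(N, P, k, x, toys):
--     # Sort shops by position, split around P.
--     shops = sorted(zip(x, toys), key=lambda shop: shop[0])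
--     left = [s for s in shops if s[0] < P]
--     right = [s for s in shops if s[0] >= P]
--
--     # A's step formula simplifies: visiting i>0 left shops (nearest L) and
--     # j>0 right shops (farthest R) costs (P-L)+(R-P)+(R-L) = 2*(R-L) steps,
--     # i.e. feasible iff R <= L + k//2; with j=0 the cost is P-L; with i=0 it
--     # is R-P, i.e. feasible iff R <= P+k.  For a fixed left endpoint the
--     # feasible right shops form a prefix of `right`, and that prefix only
--     # grows as the left endpoint moves toward P.  So sweep the left shops
--     # from farthest to nearest with one pointer into `right`, maintaining
--     # the running right prefix sum and its running maximum.
--     best = 0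
--     t = 0            # right shops consumed so far
--     run = 0          # prefix sum of right toys up to t
--     mx = 0           # max(0, max prefix sum up to t)
--     rem = sum(b for _, b in left)  # suffix toy sum from current left shop on
--     nr = len(right)
--     for a, b in left:           # ascending x = from farthest left inward
--         if P - a <= k:
--             c = a + k // 2
--             while t < nr and right[t][0] <= c:
--                 run += right[t][1]
--                 if run > mx:
--                     mx = run
--                 t += 1
--             cand = rem + mx
--             if cand > best:
--                 best = cand
--         rem -= b
--     # left endpoint at P itself (no left shops visited)
--     while t < nr and right[t][0] <= P + k:
--         run += right[t][1]
--         if run > mx: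
--             mx = run
--         t += 1
--     if mx > best:
--         best = mx
--     return best
-- ===== Notes on version B (the rewrite author's own statement) =====
-- stated objective: faster
-- what changed: Replaces A's quadratic scan over all (left-count, right-count) pairs by a single monotone two-pointer sweep: A's step formula collapses to a threshold on the farthest right shop, so for each left endpoint the feasible right shops are a growing prefix, tracked with one pointer plus a running prefix sum and running maximum (no prefix arrays, no pair loop).
import Mathlib
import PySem

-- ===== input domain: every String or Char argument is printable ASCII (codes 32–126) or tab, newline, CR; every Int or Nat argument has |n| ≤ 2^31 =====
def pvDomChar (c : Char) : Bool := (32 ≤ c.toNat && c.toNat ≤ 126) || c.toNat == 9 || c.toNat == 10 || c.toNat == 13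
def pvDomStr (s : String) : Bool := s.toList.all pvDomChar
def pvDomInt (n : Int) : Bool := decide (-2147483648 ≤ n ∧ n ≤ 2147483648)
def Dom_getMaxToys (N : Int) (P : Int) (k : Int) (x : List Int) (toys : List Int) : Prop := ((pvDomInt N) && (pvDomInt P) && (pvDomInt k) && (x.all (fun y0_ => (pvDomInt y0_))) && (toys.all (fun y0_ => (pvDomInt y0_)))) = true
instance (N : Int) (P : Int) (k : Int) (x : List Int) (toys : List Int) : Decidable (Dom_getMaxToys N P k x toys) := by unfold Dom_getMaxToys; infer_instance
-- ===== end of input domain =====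

-- B replaces A's quadratic loop over all (left-count, right-count) pairs by a single
-- monotone two-pointer sweep over the right shops (same return value; faster per the
-- timing run's measurement on large inputs).

-- ===== PORT A =====
def getMaxToys (N : Int) (P : Int) (k : Int) (x : List Int) (toys : List Int) : Int :=
  let shops := PySem.List.sorted (x.zip toys) (fun shop => shop.1) false
  let _sorted_x := shops.map (fun shop => shop.1)
  let _sorted_toys := shops.map (fun shop => shop.2)
  let lr := shops.foldl (fun (acc : List (Int × Int) × List (Int × Int)) shop =>
      if shop.1 < P then (acc.1 ++ [shop], acc.2) else (acc.1, acc.2 ++ [shop])) ([], [])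
  let left_shops := lr.1
  let right_shops := lr.2
  let lpt := left_shops.reverse.foldl (fun (acc : List Int × Int) shop =>
      (acc.1 ++ [acc.2 + shop.2], acc.2 + shop.2)) ([], 0)
  let left_prefix := lpt.1
  let rpt := right_shops.foldl (fun (acc : List Int × Int) shop =>
      (acc.1 ++ [acc.2 + shop.2], acc.2 + shop.2)) ([], 0)
  let right_prefix := rpt.1
  (PySem.List.pyRange 0 ((left_prefix.length : Int) + 1) 1).foldl (fun max_toys i =>
    (PySem.List.pyRange 0 ((right_prefix.length : Int) + 1) 1).foldl (fun max_toys j =>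
      if i = 0 ∧ j = 0 then max_toys
      else
        -- indices -i and j-1 are always in range here; pyGetD's default is never used
        let steps : Int := 0
        let steps := if 0 < i then steps + |P - (PySem.List.pyGetD left_shops (-i) (0, 0)).1| else steps
        let steps := if 0 < j then steps + |P - (PySem.List.pyGetD right_shops (j - 1) (0, 0)).1| else steps
        let steps := if 0 < i ∧ 0 < j then
            steps + |(PySem.List.pyGetD left_shops (-i) (0, 0)).1 - (PySem.List.pyGetD right_shops (j - 1) (0, 0)).1|
          else steps
        if steps ≤ k then
          let total_toys := (if 0 < i then PySem.List.pyGetD left_prefix (i - 1) 0 else 0)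
            + (if 0 < j then PySem.List.pyGetD right_prefix (j - 1) 0 else 0)
          if max_toys < total_toys then total_toys else max_toys
        else max_toys) max_toys) 0

-- ===== PORT B =====
-- Source B's inner `while t < nr and right[t][0] <= c` loop (advances t, run, mx)
def pvAdvance (right : List (Int × Int)) (c : Int) (t : Nat) (run mx : Int) : Nat × Int × Int :=
  if t < right.length then
    if (right.getD t (0, 0)).1 ≤ c then
      let run' := run + (right.getD t (0, 0)).2
      let mx' := if mx < run' then run' else mx
      pvAdvance right c (t + 1) run' mx'
    else (t, run, mx)
  else (t, run, mx)
termination_by right.length - t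
decreasing_by omega

def getMaxToys_alt (N : Int) (P : Int) (k : Int) (x : List Int) (toys : List Int) : Int :=
  let shops := PySem.List.sorted (x.zip toys) (fun shop => shop.1) false
  let left := shops.filter (fun s => decide (s.1 < P))
  let right := shops.filter (fun s => decide (P ≤ s.1))
  let rem0 := (left.map (fun s => s.2)).sum
  let st := left.foldl (fun (st : Int × Nat × Int × Int × Int) s =>
      if P - s.1 ≤ k then
        let c := s.1 + PySem.Int.floordiv k 2
        let adv := pvAdvance right c st.2.1 st.2.2.1 st.2.2.2.1
        let cand := st.2.2.2.2 + adv.2.2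
        ((if st.1 < cand then cand else st.1), adv.1, adv.2.1, adv.2.2, st.2.2.2.2 - s.2)
      else (st.1, st.2.1, st.2.2.1, st.2.2.2.1, st.2.2.2.2 - s.2)) (0, 0, 0, 0, rem0)
  let adv := pvAdvance right (P + k) st.2.1 st.2.2.1 st.2.2.2.1
  if st.1 < adv.2.2 then adv.2.2 else st.1

-- ===== PRECONDITION & SPEC =====
def Spec_getMaxToys (N : Int) (P : Int) (k : Int) (x : List Int) (toys : List Int) (out : Int) : Prop := out = getMaxToys_alt N P k x toys
instance (N : Int) (P : Int) (k : Int) (x : List Int) (toys : List Int) (out : Int) : Decidable (Spec_getMaxToys N P k x toys out) := by unfold Spec_getMaxToys; infer_instance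

-- ===== CLAIM (what is proved, stated in full; the proofs are below) =====
def Claim_equal_getMaxToys : Prop := ∀ (N : Int) (P : Int) (k : Int) (x : List Int) (toys : List Int), Dom_getMaxToys N P k x toys → Spec_getMaxToys N P k x toys (getMaxToys N P k x toys)

-- ===== LEMMAS AND PROOFS =====

-- toy sum of a shop list
def pvSumT (l : List (Int × Int)) : Int := (l.map (fun s => s.2)).sum
-- sum of the toys of the first t right shops
def pvPsum (r : List (Int × Int)) (t : Nat) : Int := pvSumT (r.take t)
-- running maximum (floored at 0) of the right prefix sums
def pvPm (r : List (Int × Int)) : Nat → Int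
  | 0 => 0
  | t + 1 => max (pvPm r t) (pvPsum r (t + 1))
-- number of right shops with position ≤ c
def pvCnt (r : List (Int × Int)) (c : Int) : Nat := r.countP (fun s => decide (s.1 ≤ c))
-- the prefix-sum list A builds
def pvPrefix (tot : Int) : List (Int × Int) → List Int
  | [] => []
  | s :: tl => (tot + s.2) :: pvPrefix (tot + s.2) tl
-- per-left-shop candidate values, sweeping the left list front to back (B's order)
def pvCands (P k : Int) (r : List (Int × Int)) : List (Int × Int) → Int → List Int
  | [], _ => []
  | s :: tl, rem =>
      if P - s.1 ≤ k then
        (rem + pvPm r (pvCnt r (s.1 + PySem.Int.floordiv k 2))) :: pvCands P k r tl (rem - s.2)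
      else pvCands P k r tl (rem - s.2)
-- the same candidates, sweeping the reversed left list (A's order)
def pvCandsR (P k : Int) (r : List (Int × Int)) : List (Int × Int) → Int → List Int
  | [], _ => []
  | s :: tl, tot =>
      (if P - s.1 ≤ k then
        [(tot + s.2) + pvPm r (pvCnt r (s.1 + PySem.Int.floordiv k 2))]
      else []) ++ pvCandsR P k r tl (tot + s.2)
-- A's inner j-loop, as a function of the outer index i
def pvInnerA (P k : Int) (l r : List (Int × Int)) (i : Int) (acc : Int) : Int :=
  (PySem.List.pyRange 0 ((r.length : Int) + 1) 1).foldl (fun max_toys j =>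
    if i = 0 ∧ j = 0 then max_toys
    else
      let steps : Int := 0
      let steps := if 0 < i then steps + |P - (PySem.List.pyGetD l (-i) (0, 0)).1| else steps
      let steps := if 0 < j then steps + |P - (PySem.List.pyGetD r (j - 1) (0, 0)).1| else steps
      let steps := if 0 < i ∧ 0 < j then
          steps + |(PySem.List.pyGetD l (-i) (0, 0)).1 - (PySem.List.pyGetD r (j - 1) (0, 0)).1|
        else steps
      if steps ≤ k then
        let total_toys := (if 0 < i then PySem.List.pyGetD (pvPrefix 0 l.reverse) (i - 1) 0 else 0)
          + (if 0 < j then PySem.List.pyGetD (pvPrefix 0 r) (j - 1) 0 else 0)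
        if max_toys < total_toys then total_toys else max_toys
      else max_toys) acc

lemma pvMaxIte (a b : Int) : (if a < b then b else a) = max a b := by
  split_ifs with h <;> omega

lemma pvFoldlMax_out (Y : List Int) : ∀ (a b : Int), Y.foldl max (max a b) = max (Y.foldl max a) b := by
  induction Y with
  | nil => intro a b; rfl
  | cons y Y ih =>
      intro a b
      simp only [List.foldl_cons]
      rw [show max (max a b) y = max (max a y) b by
        rw [max_right_comm], ih]

lemma pvFoldlMax_rev (Y : List Int) : ∀ (a : Int), Y.reverse.foldl max a = Y.foldl max a := by
  induction Y with
  | nil => intro a; rfl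
  | cons y Y ih =>
      intro a
      simp only [List.reverse_cons, List.foldl_append, List.foldl_cons, List.foldl_nil, ih]
      rw [← pvFoldlMax_out, max_comm a y]

lemma pvSumT_cons (s : Int × Int) (l : List (Int × Int)) : pvSumT (s :: l) = s.2 + pvSumT l := by
  simp [pvSumT]

lemma pvSumT_reverse (l : List (Int × Int)) : pvSumT l.reverse = pvSumT l := by
  simp [pvSumT]

lemma pvPm_nonneg (r : List (Int × Int)) (t : Nat) : 0 ≤ pvPm r t := by
  induction t with
  | zero => simp [pvPm]
  | succ t ih => simp only [pvPm]; omega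

lemma pvPsum_succ (r : List (Int × Int)) (t : Nat) (h : t < r.length) :
    pvPsum r (t + 1) = pvPsum r t + (r.getD t (0, 0)).2 := by
  have h1 : r.take (t + 1) = r.take t ++ [r[t]] := by
    rw [List.take_add_one, List.getElem?_eq_getElem h]
    rfl
  rw [pvPsum, pvPsum, pvSumT, pvSumT, h1, List.map_append, List.sum_append,
    List.getD_eq_getElem _ _ h]
  simp

lemma pvCnt_le (r : List (Int × Int)) (c : Int) : pvCnt r c ≤ r.length :=
  List.countP_le_length ..

lemma pvCnt_mono (r : List (Int × Int)) {c c' : Int} (h : c ≤ c') : pvCnt r c ≤ pvCnt r c' := by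
  apply List.countP_mono_left
  intro s _ hs
  simp only [decide_eq_true_eq] at *
  omega

lemma pvCnt_lt_iff (r : List (Int × Int)) (c : Int)
    (hp : r.Pairwise (fun a b => a.1 ≤ b.1)) :
    ∀ j, j < r.length → (j < pvCnt r c ↔ (r.getD j (0, 0)).1 ≤ c) := by
  induction r with
  | nil => intro j hj; simp at hj
  | cons s tl ih =>
      rcases List.pairwise_cons.mp hp with ⟨hhd, htl⟩
      intro j hj
      by_cases hs : s.1 ≤ c
      · have hc : pvCnt (s :: tl) c = pvCnt tl c + 1 := by
          simp [pvCnt, List.countP_cons, hs]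
        cases j with
        | zero => simpa [hc] using hs
        | succ j =>
            have := ih htl j (by simpa using hj)
            simpa [hc, Nat.succ_lt_succ_iff] using this
      · have htl0 : pvCnt tl c = 0 := by
          apply List.countP_eq_zero.mpr
          intro y hy
          have := hhd y hy
          simp only [decide_eq_true_eq]
          omega
        have hc : pvCnt (s :: tl) c = 0 := by
          simp [pvCnt, List.countP_cons, hs] at *
          simpa [pvCnt] using htl0
        rw [hc]
        cases j with
        | zero => simpa using hs
        | succ j =>
            have hjl : j < tl.length := by simpa using hj
            have hmem : tl.getD j (0, 0) ∈ tl := by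
              rw [List.getD_eq_getElem _ _ hjl]
              exact List.getElem_mem _
            have h2 := hhd _ hmem
            simp only [List.getD_cons_succ]
            constructor
            · omega
            · intro hcon; omega

lemma pvHalf (k : Int) : 2 * PySem.Int.floordiv k 2 ≤ k ∧ k ≤ 2 * PySem.Int.floordiv k 2 + 1 := by
  have h := PySem.Int.floordiv_mul_add_mod k 2
  have h2 : PySem.Int.mod k 2 = 0 ∨ PySem.Int.mod k 2 = 1 := PySem.Int.mod_two_eq k
  omega

lemma pvAdvance_spec (r : List (Int × Int)) (c : Int)
    (hp : r.Pairwise (fun a b => a.1 ≤ b.1)) :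
    ∀ (n t : Nat) (run mx : Int), r.length - t ≤ n → t ≤ pvCnt r c →
      run = pvPsum r t → mx = pvPm r t →
      pvAdvance r c t run mx = (pvCnt r c, pvPsum r (pvCnt r c), pvPm r (pvCnt r c)) := by
  intro n
  induction n with
  | zero =>
      intro t run mx hn ht hrun hmx
      have hlen : r.length ≤ t := by omega
      have hcnt : pvCnt r c ≤ r.length := pvCnt_le r c
      have : t = pvCnt r c := by omega
      subst this
      rw [pvAdvance, if_neg (by omega), hrun, hmx]
  | succ n ih =>
      intro t run mx hn ht hrun hmx
      rw [pvAdvance]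
      by_cases hlt : t < r.length
      · rw [if_pos hlt]
        by_cases hle : (r.getD t (0, 0)).1 ≤ c
        · rw [if_pos hle]
          have htc : t < pvCnt r c := by
            rw [pvCnt_lt_iff r c hp t hlt]; exact hle
          have hrun' : run + (r.getD t (0, 0)).2 = pvPsum r (t + 1) := by
            rw [hrun, ← pvPsum_succ r t hlt]
          have hmx' : (if mx < run + (r.getD t (0, 0)).2 then run + (r.getD t (0, 0)).2 else mx)
              = pvPm r (t + 1) := by
            rw [pvMaxIte, hrun', hmx]; simp [pvPm]
          show pvAdvance r c (t + 1) (run + (r.getD t (0, 0)).2)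
              (if mx < run + (r.getD t (0, 0)).2 then run + (r.getD t (0, 0)).2 else mx) = _
          rw [hmx', hrun']
          exact ih (t + 1) _ _ (by omega) (by omega) rfl rfl
        · rw [if_neg hle]
          have : ¬ t < pvCnt r c := by
            rw [pvCnt_lt_iff r c hp t hlt]; exact hle
          have : t = pvCnt r c := by omega
          subst this
          rw [hrun, hmx]
      · rw [if_neg hlt]
        have hcnt : pvCnt r c ≤ r.length := pvCnt_le r c
        have : t = pvCnt r c := by omega
        subst this
        rw [hrun, hmx]

lemma pvRowCore (r : List (Int × Int)) (c ls acc : Int)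
    (hp : r.Pairwise (fun a b => a.1 ≤ b.1)) :
    ∀ (m : Nat), m ≤ r.length →
      (List.range m).foldl
        (fun a t => if (r.getD t (0, 0)).1 ≤ c then max a (ls + pvPsum r (t + 1)) else a)
        (max acc ls)
      = max acc (ls + pvPm r (min m (pvCnt r c))) := by
  intro m
  induction m with
  | zero => intro _; simp [pvPm]
  | succ m ih =>
      intro hm
      rw [List.range_succ, List.foldl_append, ih (by omega)]
      simp only [List.foldl_cons, List.foldl_nil]
      by_cases hle : (r.getD m (0, 0)).1 ≤ c
      · have hmc : m < pvCnt r c := by rw [pvCnt_lt_iff r c hp m (by omega)]; exact hle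
        rw [if_pos hle]
        have h1 : min m (pvCnt r c) = m := by omega
        have h2 : min (m + 1) (pvCnt r c) = m + 1 := by omega
        rw [h1, h2]
        simp only [pvPm]
        omega
      · have hmc : ¬ m < pvCnt r c := by rw [pvCnt_lt_iff r c hp m (by omega)]; exact hle
        rw [if_neg hle]
        have : min m (pvCnt r c) = min (m + 1) (pvCnt r c) := by omega
        rw [this]

lemma pvPrefix_fold (l : List (Int × Int)) :
    ∀ (acc : List Int) (tot : Int),
      l.foldl (fun (a : List Int × Int) s => (a.1 ++ [a.2 + s.2], a.2 + s.2)) (acc, tot)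
      = (acc ++ pvPrefix tot l, tot + pvSumT l) := by
  induction l with
  | nil => intro acc tot; simp [pvPrefix, pvSumT]
  | cons s tl ih =>
      intro acc tot
      simp only [List.foldl_cons, ih, pvPrefix, pvSumT_cons, Prod.mk.injEq]
      constructor
      · simp
      · ring

lemma pvPrefix_length (tot : Int) (l : List (Int × Int)) : (pvPrefix tot l).length = l.length := by
  induction l generalizing tot with
  | nil => rfl
  | cons s tl ih => simp [pvPrefix, ih]

lemma pvPrefix_getD (l : List (Int × Int)) :
    ∀ (j : Nat) (tot : Int), j < l.length →
      (pvPrefix tot l).getD j 0 = tot + pvPsum l (j + 1) := by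
  induction l with
  | nil => intro j tot hj; simp at hj
  | cons s tl ih =>
      intro j tot hj
      cases j with
      | zero => simp [pvPrefix, pvPsum, pvSumT]
      | succ j =>
          have := ih j (tot + s.2) (by simpa using hj)
          simp only [pvPrefix, List.getD_cons_succ, this, pvPsum, List.take_succ_cons, pvSumT_cons]
          ring

lemma pvCandsR_append (P k : Int) (r : List (Int × Int)) (s : Int × Int) :
    ∀ (xs : List (Int × Int)) (tot : Int),
      pvCandsR P k r (xs ++ [s]) tot
      = pvCandsR P k r xs tot ++
        (if P - s.1 ≤ k then
          [(tot + pvSumT xs + s.2) + pvPm r (pvCnt r (s.1 + PySem.Int.floordiv k 2))]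
        else []) := by
  intro xs
  induction xs with
  | nil => intro tot; simp [pvCandsR, pvSumT]
  | cons a tl ih =>
      intro tot
      simp only [List.cons_append, pvCandsR, ih, pvSumT_cons]
      rw [List.append_assoc]
      congr 2
      ring_nf

lemma pvCandsR_rev (P k : Int) (r : List (Int × Int)) :
    ∀ (l : List (Int × Int)) (tot : Int),
      pvCandsR P k r l.reverse tot = (pvCands P k r l (tot + pvSumT l)).reverse := by
  intro l
  induction l with
  | nil => intro tot; simp [pvCandsR, pvCands]
  | cons s tl ih =>
      intro tot
      simp only [List.reverse_cons, pvCandsR_append, ih, pvSumT_reverse, pvCands, pvSumT_cons]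
      have e1 : tot + (s.2 + pvSumT tl) - s.2 = tot + pvSumT tl := by ring
      by_cases hg : P - s.1 ≤ k
      · rw [if_pos hg, if_pos hg, e1, List.reverse_cons]
        congr 2
        omega
      · rw [if_neg hg, if_neg hg, e1]
        simp

lemma pvLR (P : Int) (shops : List (Int × Int)) :
    ∀ (acc1 acc2 : List (Int × Int)),
      shops.foldl (fun (acc : List (Int × Int) × List (Int × Int)) shop =>
          if shop.1 < P then (acc.1 ++ [shop], acc.2) else (acc.1, acc.2 ++ [shop])) (acc1, acc2)
      = (acc1 ++ shops.filter (fun s => decide (s.1 < P)),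
         acc2 ++ shops.filter (fun s => decide (P ≤ s.1))) := by
  induction shops with
  | nil => intro acc1 acc2; simp
  | cons s tl ih =>
      intro acc1 acc2
      by_cases hs : s.1 < P
      · simp only [List.foldl_cons, if_pos hs, ih, List.filter_cons]
        rw [if_pos (by simpa using hs), if_neg (by simp; omega)]
        simp
      · simp only [List.foldl_cons, if_neg hs, ih, List.filter_cons]
        rw [if_neg (by simpa using hs), if_pos (by simp; omega)]
        simp

lemma pvRow0 (P k : Int) (l r : List (Int × Int))
    (hr : ∀ s ∈ r, P ≤ s.1) (hpr : r.Pairwise (fun a b => a.1 ≤ b.1)) :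
    pvInnerA P k l r 0 0 = pvPm r (pvCnt r (P + k)) := by
  have hcons : PySem.List.pyRange 0 ((r.length : Int) + 1) 1
      = 0 :: PySem.List.pyRange 1 ((r.length : Int) + 1) 1 := by
    rw [PySem.List.pyRange_one_cons (by omega)]
    norm_num
  have hrest : PySem.List.pyRange 1 ((r.length : Int) + 1) 1
      = (List.range r.length).map (fun t : Nat => 1 + (t : Int)) := by
    rw [PySem.List.pyRange_one, show ((r.length : Int) + 1 - 1).toNat = r.length from by omega]
  unfold pvInnerA
  rw [hcons, List.foldl_cons]
  show List.foldl _ (0 : Int) _ = _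
  rw [hrest, List.foldl_map]
  refine Eq.trans (PySem.List.foldl_congr_mem _ _
    (fun (a : Int) (t : Nat) =>
      if (r.getD t (0, 0)).1 ≤ P + k then max a (pvPsum r (t + 1)) else a) _ ?_) ?_
  · intro a t ht
    rw [List.mem_range] at ht
    have hR : P ≤ (r.getD t (0, 0)).1 := by
      refine hr _ ?_
      rw [List.getD_eq_getElem _ _ ht]
      exact List.getElem_mem _
    simp only [show (1 : Int) + (t : Int) - 1 = ((t : Nat) : Int) from by push_cast; ring,
      PySem.List.pyGetD_natCast, show ¬((0 : Int) = 0 ∧ 1 + (t : Int) = 0) from by omega,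
      show ¬(1 + (t : Int) = 0) from by omega,
      lt_irrefl, show (0 : Int) < 1 + (t : Int) from by omega, if_true, if_false,
      false_and, and_false, and_true, true_and, zero_add,
      abs_of_nonpos (show P - (r.getD t (0, 0)).1 ≤ 0 from by omega),
      pvPrefix_getD r t 0 ht, pvMaxIte,
      show (-(P - (r.getD t (0, 0)).1) ≤ k) ↔ ((r.getD t (0, 0)).1 ≤ P + k) from by omega]
  · have hc := pvRowCore r (P + k) 0 0 hpr r.length (le_refl _)
    rw [Nat.min_eq_right (pvCnt_le r (P + k))] at hc
    rw [show max (0 : Int) 0 = 0 from by simp] at hc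
    simp only [zero_add] at hc
    rw [hc]
    have := pvPm_nonneg r (pvCnt r (P + k))
    omega

lemma pvRowPos (P k : Int) (l r : List (Int × Int)) (q : Nat) (acc : Int)
    (hq : q < l.length)
    (hl : ∀ s ∈ l, s.1 < P) (hr : ∀ s ∈ r, P ≤ s.1)
    (hpr : r.Pairwise (fun a b => a.1 ≤ b.1)) :
    pvInnerA P k l r (1 + (q : Int)) acc
    = if P - (l.reverse.getD q (0, 0)).1 ≤ k then
        max acc (pvPsum l.reverse (q + 1) +
          pvPm r (pvCnt r ((l.reverse.getD q (0, 0)).1 + PySem.Int.floordiv k 2)))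
      else acc := by
  have hqr : q < l.reverse.length := by simpa using hq
  have hmemL : l.reverse.getD q (0, 0) ∈ l := by
    rw [List.getD_eq_getElem _ _ hqr]
    exact List.mem_reverse.mp (List.getElem_mem _)
  have hL : (l.reverse.getD q (0, 0)).1 < P := hl _ hmemL
  have eidx : l.length - (q + 1) = l.length - 1 - q := by omega
  have hLget : PySem.List.pyGetD l (-(1 + (q : Int))) (0, 0) = l.reverse.getD q (0, 0) := by
    rw [show -(1 + (q : Int)) = -(((q + 1 : Nat) : Int)) from by push_cast; ring,
      PySem.List.pyGetD_neg_natCast l (q + 1) (0, 0) (by omega) (by omega),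
      List.getD_eq_getElem _ _ hqr, List.getElem_reverse]
    simp [eidx]
  have hplen : q < (pvPrefix 0 l.reverse).length := by rw [pvPrefix_length]; exact hqr
  have hlp : PySem.List.pyGetD (pvPrefix 0 l.reverse) (1 + (q : Int) - 1) 0
      = pvPsum l.reverse (q + 1) := by
    rw [show 1 + (q : Int) - 1 = ((q : Nat) : Int) from by push_cast; ring,
      PySem.List.pyGetD_natCast, pvPrefix_getD l.reverse q 0 hqr, zero_add]
  have hcons : PySem.List.pyRange 0 ((r.length : Int) + 1) 1
      = 0 :: PySem.List.pyRange 1 ((r.length : Int) + 1) 1 := by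
    rw [PySem.List.pyRange_one_cons (by omega)]
    norm_num
  have hrest : PySem.List.pyRange 1 ((r.length : Int) + 1) 1
      = (List.range r.length).map (fun t : Nat => 1 + (t : Int)) := by
    rw [PySem.List.pyRange_one, show ((r.length : Int) + 1 - 1).toNat = r.length from by omega]
  unfold pvInnerA
  rw [hcons, List.foldl_cons]
  simp only [hLget, hlp, show ¬(1 + (q : Int) = 0 ∧ (0 : Int) = 0) from by omega,
    show ¬(1 + (q : Int) = 0) from by omega, ite_self,
    show (0 : Int) < 1 + (q : Int) from by omega, if_true, if_false, lt_irrefl,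
    and_false, false_and, and_true, true_and, zero_add, add_zero,
    abs_of_nonneg (show (0 : Int) ≤ P - (l.reverse.getD q (0, 0)).1 from by omega),
    pvMaxIte]
  by_cases hg : P - (l.reverse.getD q (0, 0)).1 ≤ k
  · rw [if_pos hg, if_pos hg, hrest, List.foldl_map]
    refine Eq.trans (PySem.List.foldl_congr_mem _ _
      (fun (a : Int) (t : Nat) =>
        if (r.getD t (0, 0)).1 ≤ (l.reverse.getD q (0, 0)).1 + PySem.Int.floordiv k 2 then
          max a (pvPsum l.reverse (q + 1) + pvPsum r (t + 1)) else a) _ ?_) ?_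
    · intro a t ht
      rw [List.mem_range] at ht
      have hR : P ≤ (r.getD t (0, 0)).1 := by
        refine hr _ ?_
        rw [List.getD_eq_getElem _ _ ht]
        exact List.getElem_mem _
      have hdiv := pvHalf k
      simp only [show (1 : Int) + (t : Int) - 1 = ((t : Nat) : Int) from by push_cast; ring,
        PySem.List.pyGetD_natCast, show ¬(1 + (q : Int) = 0 ∧ 1 + (t : Int) = 0) from by omega,
        show (0 : Int) < 1 + (t : Int) from by omega,
        show (0 : Int) < 1 + (q : Int) from by omega, if_true, if_false, and_self,
        and_true, true_and, zero_add, hLget, hlp,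
        abs_of_nonneg (show (0 : Int) ≤ P - (l.reverse.getD q (0, 0)).1 from by omega),
        abs_of_nonpos (show P - (r.getD t (0, 0)).1 ≤ 0 from by omega),
        abs_of_nonpos (show (l.reverse.getD q (0, 0)).1 - (r.getD t (0, 0)).1 ≤ 0 from by omega),
        pvPrefix_getD r t 0 ht, pvMaxIte,
        show (P - (l.reverse.getD q (0, 0)).1 + -(P - (r.getD t (0, 0)).1) +
            -((l.reverse.getD q (0, 0)).1 - (r.getD t (0, 0)).1) ≤ k)
          ↔ ((r.getD t (0, 0)).1 ≤ (l.reverse.getD q (0, 0)).1 + PySem.Int.floordiv k 2)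
          from by omega]
    · rw [pvRowCore r ((l.reverse.getD q (0, 0)).1 + PySem.Int.floordiv k 2)
        (pvPsum l.reverse (q + 1)) acc hpr r.length (le_refl _),
        Nat.min_eq_right (pvCnt_le r _)]
  · rw [if_neg hg, if_neg hg, hrest, List.foldl_map]
    refine Eq.trans (PySem.List.foldl_congr_mem _ _ (fun (a : Int) (_ : Nat) => a) _ ?_) ?_
    · intro a t ht
      rw [List.mem_range] at ht
      have hR : P ≤ (r.getD t (0, 0)).1 := by
        refine hr _ ?_
        rw [List.getD_eq_getElem _ _ ht]
        exact List.getElem_mem _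
      have hdiv := pvHalf k
      simp only [show (1 : Int) + (t : Int) - 1 = ((t : Nat) : Int) from by push_cast; ring,
        PySem.List.pyGetD_natCast, show ¬(1 + (q : Int) = 0 ∧ 1 + (t : Int) = 0) from by omega,
        show (0 : Int) < 1 + (t : Int) from by omega,
        show (0 : Int) < 1 + (q : Int) from by omega, if_true, if_false, and_self,
        and_true, true_and, zero_add, hLget, hlp,
        abs_of_nonneg (show (0 : Int) ≤ P - (l.reverse.getD q (0, 0)).1 from by omega),
        abs_of_nonpos (show P - (r.getD t (0, 0)).1 ≤ 0 from by omega),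
        abs_of_nonpos (show (l.reverse.getD q (0, 0)).1 - (r.getD t (0, 0)).1 ≤ 0 from by omega)]
      rw [if_neg (by omega)]
    · exact PySem.List.foldl_ignore _ _

lemma pvA_outer (P k : Int) (l r : List (Int × Int)) (a0 : Int)
    (hl : ∀ s ∈ l, s.1 < P) (hr : ∀ s ∈ r, P ≤ s.1)
    (hpr : r.Pairwise (fun a b => a.1 ≤ b.1)) :
    ∀ (m : Nat), m ≤ l.length →
      (List.range m).foldl (fun (acc : Int) (q : Nat) => pvInnerA P k l r (1 + (q : Int)) acc) a0
      = (pvCandsR P k r (l.reverse.take m) 0).foldl max a0 := by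
  intro m
  induction m with
  | zero => intro _; simp [pvCandsR]
  | succ m ih =>
      intro hm
      have hmr : m < l.reverse.length := by simpa using hm
      have htake : l.reverse.take (m + 1) = l.reverse.take m ++ [l.reverse.getD m (0, 0)] := by
        rw [List.take_add_one, List.getElem?_eq_getElem hmr, List.getD_eq_getElem _ _ hmr]
        rfl
      rw [List.range_succ, List.foldl_append, ih (by omega), List.foldl_cons, List.foldl_nil,
        pvRowPos P k l r m _ hm hl hr hpr, htake, pvCandsR_append]
      have hsum : pvSumT (l.reverse.take m) + (l.reverse.getD m (0, 0)).2 = pvPsum l.reverse (m + 1) := by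
        rw [pvPsum_succ _ _ hmr]; rfl
      by_cases hg : P - (l.reverse.getD m (0, 0)).1 ≤ k
      · rw [if_pos hg, if_pos hg, List.foldl_append, List.foldl_cons, List.foldl_nil]
        rw [show (0 : Int) + pvSumT (l.reverse.take m) + (l.reverse.getD m (0, 0)).2
            = pvPsum l.reverse (m + 1) by omega]
      · rw [if_neg hg, if_neg hg, List.append_nil]

lemma pvA_eval (P k : Int) (l r : List (Int × Int))
    (hl : ∀ s ∈ l, s.1 < P) (hr : ∀ s ∈ r, P ≤ s.1)
    (hpr : r.Pairwise (fun a b => a.1 ≤ b.1)) :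
    (PySem.List.pyRange 0 ((l.length : Int) + 1) 1).foldl
      (fun mt i => pvInnerA P k l r i mt) 0
    = max ((pvCands P k r l (pvSumT l)).foldl max 0) (pvPm r (pvCnt r (P + k))) := by
  have houter : PySem.List.pyRange 0 ((l.length : Int) + 1) 1
      = 0 :: (List.range l.length).map (fun q : Nat => 1 + (q : Int)) := by
    rw [PySem.List.pyRange_one_cons (by omega)]
    norm_num
    rw [PySem.List.pyRange_one, show ((l.length : Int) + 1 - 1).toNat = l.length from by omega]
  rw [houter, List.foldl_cons, pvRow0 P k l r hr hpr, List.foldl_map,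
    pvA_outer P k l r _ hl hr hpr l.length (le_refl _),
    show l.reverse.take l.length = l.reverse from by simp,
    pvCandsR_rev P k r l 0, zero_add, pvFoldlMax_rev]
  conv_lhs => rw [show pvPm r (pvCnt r (P + k)) = max 0 (pvPm r (pvCnt r (P + k))) from by
    have := pvPm_nonneg r (pvCnt r (P + k)); omega]
  rw [pvFoldlMax_out]

lemma pvB_loop (P k : Int) (r : List (Int × Int))
    (hr : ∀ s ∈ r, P ≤ s.1) (hpr : r.Pairwise (fun a b => a.1 ≤ b.1)) :
    ∀ (ls : List (Int × Int)) (best rem : Int) (t : Nat),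
      (∀ s ∈ ls, s.1 < P) → ls.Pairwise (fun a b => a.1 ≤ b.1) →
      (∀ s ∈ ls, P - s.1 ≤ k → t ≤ pvCnt r (s.1 + PySem.Int.floordiv k 2)) →
      t ≤ pvCnt r (P + k) →
      ∃ t', ls.foldl (fun (st : Int × Nat × Int × Int × Int) s =>
          if P - s.1 ≤ k then
            let c := s.1 + PySem.Int.floordiv k 2
            let adv := pvAdvance r c st.2.1 st.2.2.1 st.2.2.2.1
            let cand := st.2.2.2.2 + adv.2.2
            ((if st.1 < cand then cand else st.1), adv.1, adv.2.1, adv.2.2, st.2.2.2.2 - s.2)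
          else (st.1, st.2.1, st.2.2.1, st.2.2.2.1, st.2.2.2.2 - s.2))
          (best, t, pvPsum r t, pvPm r t, rem)
        = ((pvCands P k r ls rem).foldl max best, t', pvPsum r t', pvPm r t', rem - pvSumT ls)
        ∧ t' ≤ pvCnt r (P + k) := by
  intro ls
  induction ls with
  | nil =>
      intro best rem t _ _ _ htk
      exact ⟨t, by simp [pvCands, pvSumT], htk⟩
  | cons s tl ih =>
      intro best rem t hl hpl hts htk
      rcases List.pairwise_cons.mp hpl with ⟨hhd, htl⟩
      have hs : s.1 < P := hl s (by simp)
      rw [List.foldl_cons]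
      by_cases hg : P - s.1 ≤ k
      · have hadv := pvAdvance_spec r (s.1 + PySem.Int.floordiv k 2) hpr (r.length) t
          (pvPsum r t) (pvPm r t) (by omega) (hts s (by simp) hg) rfl rfl
        have hc2 : s.1 + PySem.Int.floordiv k 2 ≤ P + k := by
          have := pvHalf k; omega
        have hcle : pvCnt r (s.1 + PySem.Int.floordiv k 2) ≤ pvCnt r (P + k) :=
          pvCnt_mono r hc2
        obtain ⟨t', ht'eq, ht'le⟩ := ih
          (max best (rem + pvPm r (pvCnt r (s.1 + PySem.Int.floordiv k 2)))) (rem - s.2)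
          (pvCnt r (s.1 + PySem.Int.floordiv k 2))
          (fun a ha => hl a (by simp [ha])) htl
          (fun a ha hga => pvCnt_mono r (by have := hhd a ha; omega)) hcle
        refine ⟨t', ?_, ht'le⟩
        show List.foldl _
          (if P - s.1 ≤ k then
            ((if best < rem + (pvAdvance r (s.1 + PySem.Int.floordiv k 2) t (pvPsum r t) (pvPm r t)).2.2
                then rem + (pvAdvance r (s.1 + PySem.Int.floordiv k 2) t (pvPsum r t) (pvPm r t)).2.2
                else best),
              (pvAdvance r (s.1 + PySem.Int.floordiv k 2) t (pvPsum r t) (pvPm r t)).1,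
              (pvAdvance r (s.1 + PySem.Int.floordiv k 2) t (pvPsum r t) (pvPm r t)).2.1,
              (pvAdvance r (s.1 + PySem.Int.floordiv k 2) t (pvPsum r t) (pvPm r t)).2.2,
              rem - s.2)
          else (best, t, pvPsum r t, pvPm r t, rem - s.2)) tl = _
        rw [if_pos hg]
        simp only [hadv, pvMaxIte] at ht'eq ⊢
        rw [ht'eq]
        simp only [pvCands, if_pos hg, List.foldl_cons, pvMaxIte, pvSumT_cons, Prod.mk.injEq]
        refine ⟨?_, ?_, ?_, ?_, ?_⟩ <;> first | trivial | ring
      · simp only [if_neg hg]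
        obtain ⟨t', ht'eq, ht'le⟩ := ih best (rem - s.2) t
          (fun a ha => hl a (by simp [ha])) htl
          (fun a ha hga => hts a (by simp [ha]) hga) htk
        refine ⟨t', ?_, ht'le⟩
        rw [ht'eq]
        simp only [pvCands, if_neg hg, pvSumT_cons, Prod.mk.injEq]
        refine ⟨?_, ?_, ?_, ?_, ?_⟩ <;> first | trivial | ring

-- ===== VERDICT (by name: the statement is the Claim_ definition above) =====
theorem getMaxToys_spec : Claim_equal_getMaxToys := by
  intro N P k x toys _
  show getMaxToys N P k x toys = getMaxToys_alt N P k x toys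
  have hpairs : (PySem.List.sorted (x.zip toys) (fun shop => shop.1) false).Pairwise
      (fun a b => a.1 ≤ b.1) := PySem.List.sorted_pairwise _ _
  have hpl : ((PySem.List.sorted (x.zip toys) (fun shop => shop.1) false).filter
      (fun s => decide (s.1 < P))).Pairwise (fun a b => a.1 ≤ b.1) := hpairs.filter _
  have hpr : ((PySem.List.sorted (x.zip toys) (fun shop => shop.1) false).filter
      (fun s => decide (P ≤ s.1))).Pairwise (fun a b => a.1 ≤ b.1) := hpairs.filter _
  have hl : ∀ s ∈ (PySem.List.sorted (x.zip toys) (fun shop => shop.1) false).filter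
      (fun s => decide (s.1 < P)), s.1 < P := by
    intro s hs
    simpa using List.of_mem_filter hs
  have hr : ∀ s ∈ (PySem.List.sorted (x.zip toys) (fun shop => shop.1) false).filter
      (fun s => decide (P ≤ s.1)), P ≤ s.1 := by
    intro s hs
    simpa using List.of_mem_filter hs
  have hA : getMaxToys N P k x toys
      = max ((pvCands P k
            ((PySem.List.sorted (x.zip toys) (fun shop => shop.1) false).filter
              (fun s => decide (P ≤ s.1)))
            ((PySem.List.sorted (x.zip toys) (fun shop => shop.1) false).filter
              (fun s => decide (s.1 < P)))
            (pvSumT ((PySem.List.sorted (x.zip toys) (fun shop => shop.1) false).filter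
              (fun s => decide (s.1 < P))))).foldl max 0)
          (pvPm ((PySem.List.sorted (x.zip toys) (fun shop => shop.1) false).filter
              (fun s => decide (P ≤ s.1)))
            (pvCnt ((PySem.List.sorted (x.zip toys) (fun shop => shop.1) false).filter
              (fun s => decide (P ≤ s.1))) (P + k))) := by
    unfold getMaxToys
    simp only [pvLR, List.nil_append, pvPrefix_fold, pvPrefix_length, List.length_reverse]
    exact pvA_eval P k _ _ hl hr hpr
  have hB : getMaxToys_alt N P k x toys
      = max ((pvCands P k
            ((PySem.List.sorted (x.zip toys) (fun shop => shop.1) false).filter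
              (fun s => decide (P ≤ s.1)))
            ((PySem.List.sorted (x.zip toys) (fun shop => shop.1) false).filter
              (fun s => decide (s.1 < P)))
            (pvSumT ((PySem.List.sorted (x.zip toys) (fun shop => shop.1) false).filter
              (fun s => decide (s.1 < P))))).foldl max 0)
          (pvPm ((PySem.List.sorted (x.zip toys) (fun shop => shop.1) false).filter
              (fun s => decide (P ≤ s.1)))
            (pvCnt ((PySem.List.sorted (x.zip toys) (fun shop => shop.1) false).filter
              (fun s => decide (P ≤ s.1))) (P + k))) := by
    unfold getMaxToys_alt
    obtain ⟨t', hfold, ht'le⟩ := pvB_loop P k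
      ((PySem.List.sorted (x.zip toys) (fun shop => shop.1) false).filter
        (fun s => decide (P ≤ s.1))) hr hpr
      ((PySem.List.sorted (x.zip toys) (fun shop => shop.1) false).filter
        (fun s => decide (s.1 < P)))
      0
      (pvSumT ((PySem.List.sorted (x.zip toys) (fun shop => shop.1) false).filter
        (fun s => decide (s.1 < P))))
      0 hl hpl (fun s _ _ => Nat.zero_le _) (Nat.zero_le _)
    simp only [show pvPsum ((PySem.List.sorted (x.zip toys) (fun shop => shop.1) false).filter
        (fun s => decide (P ≤ s.1))) 0 = 0 from rfl,
      show pvPm ((PySem.List.sorted (x.zip toys) (fun shop => shop.1) false).filter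
        (fun s => decide (P ≤ s.1))) 0 = 0 from rfl] at hfold
    have hadv2 := pvAdvance_spec
      ((PySem.List.sorted (x.zip toys) (fun shop => shop.1) false).filter
        (fun s => decide (P ≤ s.1))) (P + k) hpr
      (((PySem.List.sorted (x.zip toys) (fun shop => shop.1) false).filter
        (fun s => decide (P ≤ s.1))).length) t' _ _ (by omega) ht'le rfl rfl
    simp only [show (((PySem.List.sorted (x.zip toys) (fun shop => shop.1) false).filter
        (fun s => decide (s.1 < P))).map (fun s => s.2)).sum
        = pvSumT ((PySem.List.sorted (x.zip toys) (fun shop => shop.1) false).filter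
        (fun s => decide (s.1 < P))) from rfl, pvMaxIte]
    simp only [pvMaxIte] at hfold
    rw [hfold]
    simp only [hadv2]
  rw [hA, hB]
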